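-- pv_equiv track=rewrite | github.com/fkguo/autoresearch-lab | skills/research-team/scripts/lib/tex_draft.py | strip_tex_comments
-- ===== SOURCE A (Python) =====
-- def strip_tex_comments(line: str) -> str:
--     """
--     Best-effort TeX comment stripping.
--
--     TeX treats '%' as comment start in most contexts. To avoid nuking literal '\\%' we
--     treat '%' as a comment delimiter only when preceded by an even number of backslashes.
--     This is a practical heuristic for sources that often include patterns like '\\\\%'.
--     """
--     if "%" not in line:
--         return line
--     for i, ch in enumerate(line):
--         if ch != "%":
--             continue
--         backslashes = 0
--         j = i - 1
--         while j >= 0 and line[j] == "\\":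
--             backslashes += 1
--             j -= 1
--         if backslashes % 2 == 0:
--             return line[:i]
--     return line
-- ===== SOURCE B (Python) =====
-- def strip_tex_comments(line: str) -> str:
--     backslashes = 0
--     for i, ch in enumerate(line):
--         if ch == "%" and backslashes % 2 == 0:
--             return line[:i]
--         if ch == "\\":
--             backslashes += 1
--         else:
--             backslashes = 0
--     return line
-- ===== Notes on version B (the rewrite author's own statement) =====
-- stated objective: simpler
-- what changed: Single forward pass maintaining a running backslash-run counter (reset on every non-backslash, parity checked at each percent sign) instead of a membership pre-check plus a backward re-scan at every percent sign.
import Mathlib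
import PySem

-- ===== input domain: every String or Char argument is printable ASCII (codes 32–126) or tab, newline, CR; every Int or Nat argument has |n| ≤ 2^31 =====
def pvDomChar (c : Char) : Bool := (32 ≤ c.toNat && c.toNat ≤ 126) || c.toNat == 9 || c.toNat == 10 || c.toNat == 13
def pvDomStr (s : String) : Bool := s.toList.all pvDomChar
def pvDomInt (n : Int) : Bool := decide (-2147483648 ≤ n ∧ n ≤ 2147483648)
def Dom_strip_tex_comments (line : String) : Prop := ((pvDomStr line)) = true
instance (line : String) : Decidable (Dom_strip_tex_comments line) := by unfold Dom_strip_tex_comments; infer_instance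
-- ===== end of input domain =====

-- ===== PORT A =====
-- B changes: one forward pass keeping a running backslash-run counter instead of a
-- backward re-scan at every '%' (simpler decomposition).

-- A's inner while loop: count of consecutive backslashes at indices k-1, k-2, …
def aBack (cs : List Char) : Nat → Nat
  | 0 => 0
  | k+1 => if cs[k]? = some '\\' then aBack cs k + 1 else 0

-- A's 'for i, ch in enumerate(line)' loop
def aLoop (whole : List Char) (i : Nat) : List Char → List Char
  | [] => whole
  | c :: rest =>
    if c ≠ '%' then aLoop whole (i+1) rest
    else if (aBack whole i) % 2 = 0 then whole.take i
    else aLoop whole (i+1) rest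

def strip_tex_comments (line : String) : String :=
  if '%' ∉ line.toList then line
  else String.ofList (aLoop line.toList 0 line.toList)

-- ===== PORT B =====
def bLoop (whole : List Char) (bs : Nat) (i : Nat) : List Char → List Char
  | [] => whole
  | c :: rest =>
    if c = '%' ∧ bs % 2 = 0 then whole.take i
    else bLoop whole (if c = '\\' then bs + 1 else 0) (i+1) rest

def strip_tex_comments_alt (line : String) : String :=
  String.ofList (bLoop line.toList 0 0 line.toList)

-- ===== PRECONDITION & SPEC =====
def Spec_strip_tex_comments (line : String) (out : String) : Prop := out = strip_tex_comments_alt line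
instance (line : String) (out : String) : Decidable (Spec_strip_tex_comments line out) := by unfold Spec_strip_tex_comments; infer_instance

-- ===== CLAIM (what is proved, stated in full; the proofs are below) =====
def Claim_equal_strip_tex_comments : Prop := ∀ (line : String), Dom_strip_tex_comments line → Spec_strip_tex_comments line (strip_tex_comments line)

-- ===== LEMMAS AND PROOFS =====
lemma bLoop_no_pct (whole : List Char) (bs i : Nat) (rest : List Char)
    (h : '%' ∉ rest) : bLoop whole bs i rest = whole := by
  induction rest generalizing bs i with
  | nil => rfl
  | cons c rest ih =>
    simp only [List.mem_cons, not_or] at h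
    simp [bLoop, Ne.symm h.1, ih _ _ h.2]

lemma loop_eq (whole : List Char) (rest : List Char) :
    ∀ (i bs : Nat), whole.drop i = rest → bs = aBack whole i →
    aLoop whole i rest = bLoop whole bs i rest := by
  induction rest with
  | nil => intro i bs _ _; rfl
  | cons c rest ih =>
    intro i bs hdrop hbs
    have hget : whole[i]? = some c := by
      have h0 : (whole.drop i)[0]? = some c := by rw [hdrop]; rfl
      rw [List.getElem?_drop] at h0
      simpa using h0
    have hdrop' : whole.drop (i+1) = rest := by
      have h1 : whole.drop (i+1) = (whole.drop i).drop 1 := by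
        rw [List.drop_drop]
      simp [h1, hdrop]
    by_cases hc : c = '%'
    · subst hc
      by_cases hp : bs % 2 = 0
      · simp [aLoop, bLoop, hp, ← hbs]
      · have hb' : aBack whole (i+1) = 0 := by
          simp [aBack, hget]
        have e1 : aLoop whole i ('%' :: rest) = aLoop whole (i+1) rest := by
          simp [aLoop, ← hbs, hp]
        have e2 : bLoop whole bs i ('%' :: rest) = bLoop whole 0 (i+1) rest := by
          simp [bLoop, hp]
        rw [e1, e2]
        exact ih (i+1) 0 hdrop' hb'.symm
    · have hb' : (if c = '\\' then bs + 1 else 0) = aBack whole (i+1) := by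
        by_cases hbsl : c = '\\' <;> simp [aBack, hget, hbsl, hbs]
      have e1 : aLoop whole i (c :: rest) = aLoop whole (i+1) rest := by
        simp [aLoop, hc]
      have e2 : bLoop whole bs i (c :: rest) =
          bLoop whole (if c = '\\' then bs + 1 else 0) (i+1) rest := by
        simp [bLoop, hc]
      rw [e1, e2]
      exact ih (i+1) _ hdrop' hb'

-- ===== VERDICT (by name: the statement is the Claim_ definition above) =====
theorem strip_tex_comments_spec : Claim_equal_strip_tex_comments := by
  intro line _
  unfold Spec_strip_tex_comments strip_tex_comments strip_tex_comments_alt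
  by_cases h : '%' ∈ line.toList
  · rw [if_neg (by simpa using h)]
    rw [loop_eq line.toList line.toList 0 0 rfl rfl]
  · rw [if_pos (by simpa using h), bLoop_no_pct _ _ _ _ h]
    simp
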